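-- pv_equiv track=rewrite | github.com/tadeuif/Exercicios-ACs | Matérias/Estrutura de Dados/Aula 10/cidades.py | cidades_por_letra
-- ===== SOURCE A (Python) =====
-- lista_alfa = [chr(ord('A')+i) for i in range(26)]
--
-- def cidades_por_letra(cidades):
--     d = {}
--     for i in lista_alfa:
--         lista_cidades = []
--         for cidade in cidades:
--             if cidade[0] == i:
--                 lista_cidades.append(cidade)
--                 d[i] = lista_cidades
--     return d
-- ===== SOURCE B (Python) =====
-- def cidades_por_letra(cidades):
--     d = {}
--     for cidade in cidades:
--         k = cidade[0]
--         if 'A' <= k <= 'Z':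
--             d.setdefault(k, []).append(cidade)
--     return {k: d[k] for k in sorted(d)}
-- ===== Notes on version B (the rewrite author's own statement) =====
-- stated objective: faster
-- what changed: Instead of scanning the whole city list once per letter of the alphabet (26 passes), B makes a single pass grouping cities into a dict keyed by their uppercase first letter and then emits the groups with the (at most 26) keys sorted.
import Mathlib
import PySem

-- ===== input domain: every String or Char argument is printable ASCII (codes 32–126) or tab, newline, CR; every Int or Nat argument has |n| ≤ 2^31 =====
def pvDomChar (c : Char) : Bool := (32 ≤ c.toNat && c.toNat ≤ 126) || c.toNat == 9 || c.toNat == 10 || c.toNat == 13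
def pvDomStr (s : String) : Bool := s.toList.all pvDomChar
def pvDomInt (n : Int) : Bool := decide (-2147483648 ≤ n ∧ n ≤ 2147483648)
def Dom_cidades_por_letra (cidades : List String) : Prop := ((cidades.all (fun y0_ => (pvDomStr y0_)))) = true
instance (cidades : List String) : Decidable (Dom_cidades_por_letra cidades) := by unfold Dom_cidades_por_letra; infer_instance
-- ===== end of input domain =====

-- B replaces A's 26 scans of the city list by ONE pass building a dict of groups plus a
-- sort of the (at most 26) keys present; only the RETURN value is compared here.
-- 1-char Python strings (cidade[0], the chr(...) letters, the dict keys) are represented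
-- as Char, and the returned dict's keys are rebuilt with String.singleton — exact on the
-- ASCII domain.

-- ===== PORT A =====
def lista_alfa : List Char :=
  (PySem.List.pyRange 0 26 1).map (fun i => Char.ofNat ('A'.toNat + i.toNat))

def cidades_por_letra (cidades : List String) : List (String × List String) :=
  ((lista_alfa.foldl
      (fun (d : PySem.Dict Char (List String)) i =>
        (cidades.foldl
          (fun (st : List String × PySem.Dict Char (List String)) cidade =>
            match PySem.Str.pyGet? cidade 0 with
            | none => st
            | some ch =>
              if ch == i then
                let lc := st.1 ++ [cidade]
                (lc, st.2.insert i lc)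
              else st)
          ([], d)).2)
      PySem.Dict.empty).items).map (fun p => (String.singleton p.1, p.2))

-- ===== PORT B =====
def cidades_por_letra_alt (cidades : List String) : List (String × List String) :=
  let d := cidades.foldl
    (fun (d : PySem.Dict Char (List String)) cidade =>
      match PySem.Str.pyGet? cidade 0 with
      | none => d
      | some k =>
        if 'A' ≤ k ∧ k ≤ 'Z' then d.modify k [] (· ++ [cidade]) else d)
    PySem.Dict.empty
  (PySem.List.sorted d.keys (fun k => k) false).map (fun k => (String.singleton k, d.getD k []))

-- ===== PRECONDITION & SPEC =====
-- Pre_ excludes exactly the lists containing an empty string: there cidade[0] raises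
-- IndexError in A (and in B as well).
def Pre_cidades_por_letra (cidades : List String) : Prop := ∀ c ∈ cidades, c ≠ ""
instance (cidades : List String) : Decidable (Pre_cidades_por_letra cidades) := by
  unfold Pre_cidades_por_letra; infer_instance

def pvWitness_cidades_por_letra : List String := ["Aracaju", "Belem", "Aracati", "salvador", "Belo Horizonte"]

def Spec_cidades_por_letra (cidades : List String) (out : List (String × List String)) : Prop := out = cidades_por_letra_alt cidades
instance (cidades : List String) (out : List (String × List String)) : Decidable (Spec_cidades_por_letra cidades out) := by unfold Spec_cidades_por_letra; infer_instance

-- ===== CLAIM (what is proved, stated in full; the proofs are below) =====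
def Claim_equal_cidades_por_letra : Prop := ∀ (cidades : List String), Dom_cidades_por_letra cidades → Pre_cidades_por_letra cidades → Spec_cidades_por_letra cidades (cidades_por_letra cidades)

-- ===== LEMMAS AND PROOFS =====

-- first character of a (nonempty) string, as the ports see it
def kf (c : String) : Char := c.toList.headD ' '

def grp (cidades : List String) (i : Char) : List String := cidades.filter (fun c => kf c == i)

theorem pyGet0 (c : String) (h : c ≠ "") : PySem.Str.pyGet? c 0 = some (kf c) := by
  have hl : c.toList ≠ [] := by simpa using h
  cases hc : c.toList with
  | nil => exact absurd hc hl
  | cons x xs => simp [PySem.Str.pyGet?, hc, kf]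

theorem char_le_iff (a b : Char) : a ≤ b ↔ a.toNat ≤ b.toNat := by
  rw [Char.le_def, UInt32.le_iff_toNat_le]; rfl

theorem lista_alfa_eq : lista_alfa = ['A','B','C','D','E','F','G','H','I','J','K','L','M','N','O','P','Q','R','S','T','U','V','W','X','Y','Z'] := by decide

theorem mem_lista_alfa (ch : Char) : ch ∈ lista_alfa ↔ ('A' ≤ ch ∧ ch ≤ 'Z') := by
  rw [lista_alfa_eq]
  constructor
  · intro h; fin_cases h <;> exact ⟨by decide, by decide⟩
  · rintro ⟨h1, h2⟩
    have hn1 : 65 ≤ ch.toNat := (char_le_iff _ _).1 h1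
    have hn2 : ch.toNat ≤ 90 := (char_le_iff _ _).1 h2
    have hch : ch = Char.ofNat ch.toNat := (Char.ofNat_toNat ch).symm
    set n := ch.toNat with hn
    rw [hch]
    interval_cases n <;> decide

theorem innerA (cidades : List String) (i : Char) (h : ∀ c ∈ cidades, c ≠ "") :
    ∀ (lst : List String) (d : PySem.Dict Char (List String)),
    cidades.foldl
      (fun (st : List String × PySem.Dict Char (List String)) cidade =>
        match PySem.Str.pyGet? cidade 0 with
        | none => st
        | some ch =>
          if ch == i then (st.1 ++ [cidade], st.2.insert i (st.1 ++ [cidade]))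
          else st)
      (lst, d)
    = (lst ++ grp cidades i,
       if grp cidades i = [] then d else d.insert i (lst ++ grp cidades i)) := by
  induction cidades with
  | nil => intro lst d; simp [grp]
  | cons c cs ih =>
    intro lst d
    have hc : c ≠ "" := h c (by simp)
    have hcs : ∀ x ∈ cs, x ≠ "" := fun x hx => h x (by simp [hx])
    simp only [List.foldl_cons, pyGet0 c hc]
    by_cases hk : (kf c == i) = true
    · rw [if_pos hk, ih hcs (lst ++ [c]) ((d.insert i (lst ++ [c])))]
      have hg : grp (c :: cs) i = c :: grp cs i := by
        simp [grp, hk]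
      by_cases hemp : grp cs i = []
      · simp [hg, hemp]
      · simp [hg, hemp, PySem.Dict.insert_insert_self]
    · rw [if_neg hk, ih hcs lst d]
      have hg : grp (c :: cs) i = grp cs i := by
        simp [grp, hk]
      simp [hg]

theorem outerA (cidades : List String) :
    ∀ (L : List Char) (d : PySem.Dict Char (List String)),
      (∀ i ∈ L, d.contains i = false) → L.Nodup →
      (L.foldl (fun d i => if grp cidades i = [] then d else d.insert i (grp cidades i)) d).items
        = d.items ++ (L.filter (fun i => !(grp cidades i).isEmpty)).map (fun i => (i, grp cidades i)) := by
  intro L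
  induction L with
  | nil => intro d _ _; simp
  | cons i L ih =>
    intro d hfresh hnd
    have hiL : i ∉ L := (List.nodup_cons.1 hnd).1
    have hndL : L.Nodup := (List.nodup_cons.1 hnd).2
    simp only [List.foldl_cons, List.filter_cons]
    by_cases hemp : grp cidades i = []
    · rw [if_pos hemp]
      have : (!(grp cidades i).isEmpty) = false := by simp [hemp]
      rw [this]
      simp only [Bool.false_eq_true, if_false]
      exact ih d (fun j hj => hfresh j (List.mem_cons_of_mem _ hj)) hndL
    · rw [if_neg hemp]
      have hco : (!(grp cidades i).isEmpty) = true := by simp [hemp]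
      rw [hco]
      simp only [if_true]
      rw [ih (d.insert i (grp cidades i))
        (fun j hj => by
          rw [PySem.Dict.contains_insert]
          have : j ≠ i := fun he => hiL (he ▸ hj)
          simp [this, hfresh j (List.mem_cons_of_mem _ hj)])
        hndL]
      have hci : d.contains i = false := hfresh i (List.mem_cons_self ..)
      rw [PySem.Dict.items_insert, hci]
      simp

theorem A_closed (cidades : List String) (h : ∀ c ∈ cidades, c ≠ "") :
    cidades_por_letra cidades
      = ((lista_alfa.filter (fun i => !(grp cidades i).isEmpty)).map
          (fun i => (String.singleton i, grp cidades i))) := by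
  unfold cidades_por_letra
  have hstep : (fun (d : PySem.Dict Char (List String)) i =>
        (cidades.foldl
          (fun (st : List String × PySem.Dict Char (List String)) cidade =>
            match PySem.Str.pyGet? cidade 0 with
            | none => st
            | some ch =>
              if ch == i then
                let lc := st.1 ++ [cidade]
                (lc, st.2.insert i lc)
              else st)
          ([], d)).2)
      = (fun (d : PySem.Dict Char (List String)) i =>
          if grp cidades i = [] then d else d.insert i ([] ++ grp cidades i)) := by
    funext d i
    show (cidades.foldl
          (fun (st : List String × PySem.Dict Char (List String)) cidade =>
            match PySem.Str.pyGet? cidade 0 with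
            | none => st
            | some ch =>
              if ch == i then (st.1 ++ [cidade], st.2.insert i (st.1 ++ [cidade]))
              else st)
          ([], d)).2 = _
    rw [innerA cidades i h [] d]
  rw [hstep]
  have hins : (fun (d : PySem.Dict Char (List String)) i =>
        if grp cidades i = [] then d else d.insert i ([] ++ grp cidades i))
      = (fun (d : PySem.Dict Char (List String)) i =>
        if grp cidades i = [] then d else d.insert i (grp cidades i)) := by
    funext d i; simp
  rw [hins, outerA cidades lista_alfa PySem.Dict.empty
    (fun i _ => PySem.Dict.contains_empty i) (by rw [lista_alfa_eq]; decide)]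
  have hempty : (PySem.Dict.empty : PySem.Dict Char (List String)).items = [] := rfl
  rw [hempty]
  simp [List.map_map, Function.comp_def]

theorem foldB (cidades : List String) (h : ∀ c ∈ cidades, c ≠ "") (d : PySem.Dict Char (List String)) :
    cidades.foldl
      (fun (d : PySem.Dict Char (List String)) cidade =>
        match PySem.Str.pyGet? cidade 0 with
        | none => d
        | some k =>
          if 'A' ≤ k ∧ k ≤ 'Z' then d.modify k [] (· ++ [cidade]) else d)
      d
    = (cidades.filter (fun c => decide ('A' ≤ kf c ∧ kf c ≤ 'Z'))).foldl
        (fun d c => d.modify (kf c) [] (· ++ [c])) d := by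
  induction cidades generalizing d with
  | nil => simp
  | cons c cs ih =>
    have hc : c ≠ "" := h c (List.mem_cons_self ..)
    have hcs : ∀ x ∈ cs, x ≠ "" := fun x hx => h x (List.mem_cons_of_mem _ hx)
    simp only [List.foldl_cons, pyGet0 c hc, List.filter_cons]
    by_cases hu : 'A' ≤ kf c ∧ kf c ≤ 'Z'
    · rw [if_pos hu]
      have : decide ('A' ≤ kf c ∧ kf c ≤ 'Z') = true := by simp [hu]
      rw [this]
      simp only [if_true, List.foldl_cons]
      exact ih hcs _
    · rw [if_neg hu]
      have : decide ('A' ≤ kf c ∧ kf c ≤ 'Z') = false := by simp [hu]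
      rw [this]
      simp only [Bool.false_eq_true, if_false]
      exact ih hcs _

theorem B_keys_getD (cidades : List String) (k : Char) :
    ((cidades.foldl (fun d c => d.modify (kf c) [] (· ++ [c])) (PySem.Dict.empty : PySem.Dict Char (List String))).getD k [])
      = cidades.filter (fun c => kf c == k) := by
  have hmap : cidades.foldl (fun d c => d.modify (kf c) [] (· ++ [c])) (PySem.Dict.empty : PySem.Dict Char (List String))
      = (cidades.map (fun c => (kf c, c))).foldl (fun d p => d.modify p.1 [] (· ++ [p.2])) PySem.Dict.empty := by
    rw [List.foldl_map]
  rw [hmap, PySem.Dict.getD_foldl_modify_append]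
  simp [PySem.Dict.getD_empty, List.filter_map, Function.comp_def, List.map_map]

theorem B_keys_mem (cidades : List String) (x : Char) :
    (x ∈ (cidades.foldl (fun d c => d.modify (kf c) [] (· ++ [c])) (PySem.Dict.empty : PySem.Dict Char (List String))).keys)
      ↔ ∃ c ∈ cidades, kf c = x := by
  rw [PySem.Dict.keys_foldl_modify_key]
  simp [PySem.Dict.keys_empty, PySem.Set.update_nil_left, PySem.Set.mem_ofList, eq_comm]

theorem B_keys_nodup (cidades : List String) :
    ((cidades.foldl (fun d c => d.modify (kf c) [] (· ++ [c])) (PySem.Dict.empty : PySem.Dict Char (List String))).keys).Nodup :=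
  PySem.Dict.nodup_keys_foldl_modify_key _ _ _ _ _ PySem.Dict.nodup_keys_empty

theorem memLF (cidades : List String) (x : Char) :
    (x ∈ lista_alfa.filter (fun i => !(grp cidades i).isEmpty))
      ↔ ∃ c ∈ cidades, ('A' ≤ kf c ∧ kf c ≤ 'Z') ∧ kf c = x := by
  rw [List.mem_filter, mem_lista_alfa]
  constructor
  · rintro ⟨⟨h1, h2⟩, hne⟩
    have hg : grp cidades x ≠ [] := by simpa using hne
    obtain ⟨c, hc⟩ := List.exists_mem_of_ne_nil _ hg
    rw [grp, List.mem_filter] at hc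
    have he : kf c = x := by simpa using hc.2
    exact ⟨c, hc.1, ⟨he ▸ h1, he ▸ h2⟩, he⟩
  · rintro ⟨c, hc, hup, he⟩
    subst he
    refine ⟨hup, ?_⟩
    have : c ∈ grp cidades (kf c) := by
      rw [grp, List.mem_filter]; simp [hc]
    simp
    exact fun hnil => by rw [hnil] at this; simp at this

theorem B_closed (cidades : List String) (h : ∀ c ∈ cidades, c ≠ "") :
    cidades_por_letra_alt cidades
      = ((lista_alfa.filter (fun i => !(grp cidades i).isEmpty)).map
          (fun i => (String.singleton i, grp cidades i))) := by
  simp only [cidades_por_letra_alt]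
  rw [foldB cidades h]
  have hsorted : PySem.List.sorted
      ((cidades.filter (fun c => decide ('A' ≤ kf c ∧ kf c ≤ 'Z'))).foldl
        (fun d c => d.modify (kf c) [] (· ++ [c])) (PySem.Dict.empty : PySem.Dict Char (List String))).keys
      (fun k => k) false
      = lista_alfa.filter (fun i => !(grp cidades i).isEmpty) := by
    apply PySem.List.sorted_eq_of_perm_of_pairwise_lt
    · rw [List.perm_ext_iff_of_nodup
        (List.filter_sublist.nodup (by rw [lista_alfa_eq]; decide))
        (B_keys_nodup _)]
      intro x
      rw [memLF, B_keys_mem]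
      constructor
      · rintro ⟨c, hc, hup, he⟩
        exact ⟨c, by rw [List.mem_filter]; simp [hc, hup], he⟩
      · rintro ⟨c, hc, he⟩
        rw [List.mem_filter] at hc
        exact ⟨c, hc.1, by simpa using hc.2, he⟩
    · exact List.Pairwise.sublist List.filter_sublist (by rw [lista_alfa_eq]; decide)
  rw [hsorted]
  apply List.map_congr_left
  intro k hk
  rw [B_keys_getD]
  have hup : 'A' ≤ k ∧ k ≤ 'Z' := by
    rw [List.mem_filter, mem_lista_alfa] at hk; exact hk.1
  rw [List.filter_filter]
  have hgr : cidades.filter (fun c => kf c == k && decide ('A' ≤ kf c ∧ kf c ≤ 'Z')) = grp cidades k := by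
    rw [grp]
    apply List.filter_congr
    intro c _
    by_cases hkc : (kf c == k) = true
    · have he : kf c = k := by simpa using hkc
      simp [he, hup]
    · simp [hkc]
  rw [hgr]

-- ===== VERDICT (by name: the statement is the Claim_ definition above) =====
theorem cidades_por_letra_spec : Claim_equal_cidades_por_letra := by
  intro cidades _hdom hpre
  unfold Spec_cidades_por_letra
  rw [A_closed cidades hpre, B_closed cidades hpre]
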